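-- pv_equiv track=rewrite | github.com/wankhadenitin56/bioxcel | gliner_model_news.py | extract_entities_from_chunk
-- ===== SOURCE A (Python) =====
-- from typing import List, Dict, Set
--
-- def extract_entities_from_chunk(chunk: str, drugs: List[str], diseases: List[str], organizations: List[str]) -> Dict[str, List[str]]:
--     """
--     Extract entities present in a specific chunk
--     """
--     chunk_lower = chunk.lower()
--
--     found_entities = {
--         'drugs': [drug for drug in drugs if drug.lower() in chunk_lower],
--         'diseases': [disease for disease in diseases if disease.lower() in chunk_lower],
--         'organizations': [org for org in organizations if org.lower() in chunk_lower]
--     }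
--
--     return found_entities
-- ===== SOURCE B (Python) =====
-- def extract_entities_from_chunk(chunk, drugs, diseases, organizations):
--     text = chunk.lower()
--     cap = max((len(s) for s in drugs + diseases + organizations), default=0)
--     # index every substring of the chunk up to the longest pattern length once,
--     # then each pattern query is a single set lookup
--     subs = {text[i:i + m] for i in range(len(text) + 1) for m in range(cap + 1)}
--     return {
--         'drugs': [d for d in drugs if d.lower() in subs],
--         'diseases': [d for d in diseases if d.lower() in subs],
--         'organizations': [o for o in organizations if o.lower() in subs],
--     }
-- ===== Notes on version B (the rewrite author's own statement) =====
-- stated objective: faster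
-- what changed: Instead of running a substring search over the chunk per pattern, B builds once a hash set of every substring of the lowercased chunk up to the longest pattern length, then filters each list by a single O(1) average set lookup per pattern.
import Mathlib
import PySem

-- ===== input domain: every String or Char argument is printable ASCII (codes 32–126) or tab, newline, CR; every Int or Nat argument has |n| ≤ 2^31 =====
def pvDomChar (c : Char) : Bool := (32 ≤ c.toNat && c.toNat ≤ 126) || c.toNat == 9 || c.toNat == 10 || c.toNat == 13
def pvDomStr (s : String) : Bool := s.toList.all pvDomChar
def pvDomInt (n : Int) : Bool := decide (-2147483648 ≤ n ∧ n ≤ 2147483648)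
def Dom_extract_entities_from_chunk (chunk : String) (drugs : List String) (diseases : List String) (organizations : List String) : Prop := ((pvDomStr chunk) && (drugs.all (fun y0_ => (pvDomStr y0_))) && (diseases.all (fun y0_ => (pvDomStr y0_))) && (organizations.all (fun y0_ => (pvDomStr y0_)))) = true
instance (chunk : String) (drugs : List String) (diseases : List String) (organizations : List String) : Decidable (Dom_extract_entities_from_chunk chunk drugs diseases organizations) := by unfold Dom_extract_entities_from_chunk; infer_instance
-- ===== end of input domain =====

-- B builds a set of all chunk substrings up to the longest pattern length once, then answers
-- every pattern by one set-membership lookup instead of a per-pattern substring search.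

-- ===== PORT A =====
def extract_entities_from_chunk (chunk : String) (drugs : List String) (diseases : List String) (organizations : List String) : List (String × List String) :=
  let chunk_lower := PySem.Str.lower chunk
  [("drugs", drugs.filter (fun drug => PySem.Str.isIn (PySem.Str.lower drug) chunk_lower)),
   ("diseases", diseases.filter (fun disease => PySem.Str.isIn (PySem.Str.lower disease) chunk_lower)),
   ("organizations", organizations.filter (fun org => PySem.Str.isIn (PySem.Str.lower org) chunk_lower))]

-- ===== PORT B =====
-- subs = {text[i:i+m] for i in range(len(text)+1) for m in range(cap+1)}
def pvSubsB (text : List Char) (cap : Nat) : PySem.Set (List Char) :=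
  PySem.Set.ofList ((List.range (text.length + 1)).flatMap (fun i =>
    (List.range (cap + 1)).map (fun m => (text.drop i).take m)))

def extract_entities_from_chunk_alt (chunk : String) (drugs : List String) (diseases : List String) (organizations : List String) : List (String × List String) :=
  let text := PySem.Chars.lower chunk.toList
  -- cap = max((len(s) for s in drugs + diseases + organizations), default=0)
  let cap := ((drugs ++ diseases ++ organizations).map (fun s => s.toList.length)).foldl max 0
  let subs := pvSubsB text cap
  [("drugs", drugs.filter (fun d => PySem.Set.contains subs (PySem.Chars.lower d.toList))),
   ("diseases", diseases.filter (fun d => PySem.Set.contains subs (PySem.Chars.lower d.toList))),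
   ("organizations", organizations.filter (fun o => PySem.Set.contains subs (PySem.Chars.lower o.toList)))]

-- ===== PRECONDITION & SPEC =====
def Spec_extract_entities_from_chunk (chunk : String) (drugs : List String) (diseases : List String) (organizations : List String) (out : List (String × List String)) : Prop := out = extract_entities_from_chunk_alt chunk drugs diseases organizations
instance (chunk : String) (drugs : List String) (diseases : List String) (organizations : List String) (out : List (String × List String)) : Decidable (Spec_extract_entities_from_chunk chunk drugs diseases organizations out) := by unfold Spec_extract_entities_from_chunk; infer_instance

-- ===== CLAIM (what is proved, stated in full; the proofs are below) =====
def Claim_equal_extract_entities_from_chunk : Prop := ∀ (chunk : String) (drugs : List String) (diseases : List String) (organizations : List String), Dom_extract_entities_from_chunk chunk drugs diseases organizations → Spec_extract_entities_from_chunk chunk drugs diseases organizations (extract_entities_from_chunk chunk drugs diseases organizations)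

-- ===== LEMMAS AND PROOFS =====

-- B's substring index answers exactly Python's 'p in text' for any pattern of length ≤ cap
theorem pvSubsB_contains (text : List Char) (cap : Nat) (p : List Char) (hc : p.length ≤ cap) :
    PySem.Set.contains (pvSubsB text cap) p = PySem.Chars.isIn p text := by
  rw [Bool.eq_iff_iff, PySem.Set.contains_iff]
  unfold pvSubsB
  rw [PySem.Set.mem_ofList, ← PySem.Chars.exists_prefix_drop_iff_isIn]
  simp only [List.mem_flatMap, List.mem_map, List.mem_range]
  constructor
  · rintro ⟨i, _, m, _, rfl⟩
    exact ⟨i, List.take_prefix m _⟩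
  · rintro ⟨j, hj⟩
    by_cases hle : j ≤ text.length
    · refine ⟨j, by omega, p.length, by omega, ?_⟩
      obtain ⟨t, ht⟩ := hj
      rw [← ht, List.take_left]
    · have hnil : text.drop j = [] := List.drop_eq_nil_of_le (by omega)
      rw [hnil] at hj
      have : p = [] := List.prefix_nil.mp hj
      exact ⟨0, by omega, 0, by omega, by simp [this]⟩

-- every pattern's lowercase has length ≤ cap when its original string is in the pooled list
theorem pv_len_le_cap (s : String) (all : List String) (hs : s ∈ all) :
    (PySem.Chars.lower s.toList).length ≤ (all.map (fun t => t.toList.length)).foldl max 0 := by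
  have h1 : (PySem.Chars.lower s.toList).length = s.toList.length := by
    simp [PySem.Chars.lower]
  rw [h1]
  exact (PySem.List.le_foldl_max _ _).2 _ (List.mem_map_of_mem hs)

-- ===== VERDICT (by name: the statement is the Claim_ definition above) =====
theorem extract_entities_from_chunk_spec : Claim_equal_extract_entities_from_chunk := by
  intro chunk drugs diseases organizations _
  unfold Spec_extract_entities_from_chunk extract_entities_from_chunk extract_entities_from_chunk_alt
  have hfix : ∀ (l : List String), (∀ s ∈ l, s ∈ drugs ++ diseases ++ organizations) →
      l.filter (fun d => PySem.Str.isIn (PySem.Str.lower d) (PySem.Str.lower chunk)) =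
      l.filter (fun d => PySem.Set.contains
        (pvSubsB (PySem.Chars.lower chunk.toList)
          (((drugs ++ diseases ++ organizations).map (fun s => s.toList.length)).foldl max 0))
        (PySem.Chars.lower d.toList)) := by
    intro l hl
    apply List.filter_congr
    intro d hd
    rw [pvSubsB_contains _ _ _ (pv_len_le_cap d _ (hl d hd))]
    simp [PySem.Str.isIn, PySem.Str.lower]
  simp only []
  rw [hfix drugs (by intro s hs; simp [hs]),
      hfix diseases (by intro s hs; simp [hs]),
      hfix organizations (by intro s hs; simp [hs])]
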